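-- pv_equiv track=rewrite | github.com/FabianMenekshi/LLMs_Robustness_Under_Distractions | src/prompt_builder.py | select_preview_records_by_task
-- ===== SOURCE A (Python) =====
-- from collections import defaultdict
-- from typing import Dict, Any, List, Optional
--
-- def select_preview_records_by_task(
--     records: List[Dict[str, Any]],
--     examples_per_task: int = 2,
-- ) -> List[Dict[str, Any]]:
--     """
--     Select a small preview subset that covers all task families.
--     """
--     grouped = defaultdict(list)
--     for record in records:
--         grouped[record["task_name"]].append(record)
--
--     selected = []
--     for task_name in sorted(grouped.keys()):
--         selected.extend(grouped[task_name][:examples_per_task])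
--
--     return selected
-- ===== SOURCE B (Python) =====
-- def select_preview_records_by_task(records, examples_per_task=2):
--     tasks = sorted({r["task_name"] for r in records})
--     selected = []
--     for t in tasks:
--         selected.extend([r for r in records if r["task_name"] == t][:examples_per_task])
--     return selected
-- ===== Notes on version B (the rewrite author's own statement) =====
-- stated objective: simpler
-- what changed: Replaces A's defaultdict grouping plus sorted-keys loop by computing the sorted set of task names once and taking filter(records)[:examples_per_task] per task, with no intermediate dict.
import Mathlib
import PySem

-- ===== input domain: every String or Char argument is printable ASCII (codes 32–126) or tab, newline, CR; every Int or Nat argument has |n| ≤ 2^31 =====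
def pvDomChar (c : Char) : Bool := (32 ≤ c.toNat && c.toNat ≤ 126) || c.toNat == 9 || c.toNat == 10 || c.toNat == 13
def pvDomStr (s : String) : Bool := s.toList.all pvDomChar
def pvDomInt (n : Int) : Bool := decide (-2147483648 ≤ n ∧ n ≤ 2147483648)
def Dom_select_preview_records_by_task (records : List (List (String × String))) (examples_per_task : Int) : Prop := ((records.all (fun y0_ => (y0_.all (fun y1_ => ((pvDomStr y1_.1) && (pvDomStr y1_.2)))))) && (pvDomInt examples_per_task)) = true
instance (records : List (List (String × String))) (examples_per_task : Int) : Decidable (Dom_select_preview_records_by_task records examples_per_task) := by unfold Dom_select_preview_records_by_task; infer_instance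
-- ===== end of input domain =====

-- B replaces A's defaultdict grouping by sorted distinct task names with a per-task filter+slice (objective: simpler; return-value equivalence).
-- ===== PORT A =====
-- record["task_name"]: first-match lookup; the "" default is never reached under Pre_ (every record carries the key)
def pvTaskName (r : List (String × String)) : String :=
  ((PySem.Dict.mk r).get? "task_name").getD ""

def select_preview_records_by_task (records : List (List (String × String))) (examples_per_task : Int) : List (List (String × String)) :=
  let grouped := records.foldl (fun d r => PySem.Dict.modify d (pvTaskName r) [] (fun l => l ++ [r]))
      PySem.Dict.empty
  (PySem.List.sorted (PySem.Dict.keys grouped) (fun k => k) false).foldl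
    (fun sel k => sel ++ PySem.List.slice (PySem.Dict.getD grouped k []) none (some examples_per_task)) []

-- ===== PORT B =====
def select_preview_records_by_task_alt (records : List (List (String × String))) (examples_per_task : Int) : List (List (String × String)) :=
  let tasks := PySem.List.sorted (PySem.Set.ofList (records.map pvTaskName)) (fun k => k) false
  tasks.foldl
    (fun sel t => sel ++ PySem.List.slice (records.filter (fun r => pvTaskName r == t)) none (some examples_per_task)) []

-- ===== PRECONDITION & SPEC =====
-- Pre_ excludes records missing the "task_name" key, on which Python A raises KeyError.
def Pre_select_preview_records_by_task (records : List (List (String × String))) (examples_per_task : Int) : Prop :=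
  records.all (fun r => r.any (fun p => p.1 == "task_name")) = true
instance (records : List (List (String × String))) (examples_per_task : Int) : Decidable (Pre_select_preview_records_by_task records examples_per_task) := by unfold Pre_select_preview_records_by_task; infer_instance
def pvWitness_select_preview_records_by_task : (List (List (String × String))) × Int :=
  ([[("task_name", "qa"), ("text", "x")], [("task_name", "math")]], 2)

-- ===== PRECONDITION & SPEC =====
def Spec_select_preview_records_by_task (records : List (List (String × String))) (examples_per_task : Int) (out : List (List (String × String))) : Prop := out = select_preview_records_by_task_alt records examples_per_task
instance (records : List (List (String × String))) (examples_per_task : Int) (out : List (List (String × String))) : Decidable (Spec_select_preview_records_by_task records examples_per_task out) := by unfold Spec_select_preview_records_by_task; infer_instance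

-- ===== CLAIM (what is proved, stated in full; the proofs are below) =====
def Claim_equal_select_preview_records_by_task : Prop := ∀ (records : List (List (String × String))) (examples_per_task : Int), Dom_select_preview_records_by_task records examples_per_task → Pre_select_preview_records_by_task records examples_per_task → Spec_select_preview_records_by_task records examples_per_task (select_preview_records_by_task records examples_per_task)

-- ===== LEMMAS AND PROOFS =====
lemma grouped_getD (records : List (List (String × String))) (k : String) :
    (records.foldl (fun d r => PySem.Dict.modify d (pvTaskName r) [] (fun l => l ++ [r]))
        PySem.Dict.empty).getD k []
      = records.filter (fun r => pvTaskName r == k) := by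
  rw [show (records.foldl (fun d r => PySem.Dict.modify d (pvTaskName r) [] (fun l => l ++ [r]))
        PySem.Dict.empty : PySem.Dict String (List (List (String × String))))
      = (records.map (fun r => (pvTaskName r, r))).foldl
          (fun d p => PySem.Dict.modify d p.1 [] (fun l => l ++ [p.2])) PySem.Dict.empty
    from by rw [List.foldl_map]]
  rw [PySem.Dict.getD_foldl_modify_append]
  simp [List.filter_map, Function.comp_def]

lemma grouped_keys (records : List (List (String × String))) :
    (records.foldl (fun d r => PySem.Dict.modify d (pvTaskName r) [] (fun l => l ++ [r]))
        PySem.Dict.empty).keys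
      = PySem.Set.ofList (records.map pvTaskName) := by
  rw [PySem.Dict.keys_foldl_modify_key]
  simp [PySem.Set.ofList_eq_foldl, PySem.Set.update]

-- ===== VERDICT (by name: the statement is the Claim_ definition above) =====
theorem select_preview_records_by_task_spec : Claim_equal_select_preview_records_by_task := by
  intro records n _ _
  unfold Spec_select_preview_records_by_task select_preview_records_by_task select_preview_records_by_task_alt
  simp only [grouped_keys, grouped_getD]
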